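-- pv_equiv track=rewrite | github.com/whatitsoundslike/upup-admin | python_script/test.py | find_recipe_id
-- ===== SOURCE A (Python) =====
-- def find_recipe_id(name_food, star, id_mapping):
--     """nameFood와 star를 기준으로 ID 찾기"""
--     if not name_food:
--         return None
--
--     # nameFood에서 | 앞부분만 추출 (예: "유자청 갈비찜| 박수받는..." → "유자청 갈비찜")
--     name_food_clean = name_food.split('|')[0].strip()
--
--     for name, recipe_id in id_mapping.items():
--         # nameFood가 매핑 이름에 포함되어 있는지 확인
--         if name_food_clean in name:
--             # star도 일치하는지 확인 (있는 경우)
--             if star and star in name: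
--                 return recipe_id
--             elif not star:
--                 return recipe_id
--
--     # star 없이 nameFood만으로 다시 검색
--     for name, recipe_id in id_mapping.items():
--         if name_food_clean in name:
--             return recipe_id
--
--     return None
-- ===== SOURCE B (Python) =====
-- def find_recipe_id(name_food, star, id_mapping):
--     """Filter-then-select: build the list of substring matches once, then pick
--     the first star match among them (if star given), else the first match."""
--     if not name_food:
--         return None
--     clean = name_food.split('|')[0].strip()
--     matches = [(n, r) for n, r in id_mapping.items() if clean in n]
--     if not matches:
--         return None
--     if star:
--         hit = next((r for n, r in matches if star in n), None)
--         if hit is not None: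
--             return hit
--     return matches[0][1]
-- ===== Notes on version B (the rewrite author's own statement) =====
-- stated objective: simpler
-- what changed: Replaces A's two staged recursive scans with a filter-then-select decomposition: build the substring-match list once, then pick the first star match within it (via find/next), falling back to the head of the match list.
import Mathlib
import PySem

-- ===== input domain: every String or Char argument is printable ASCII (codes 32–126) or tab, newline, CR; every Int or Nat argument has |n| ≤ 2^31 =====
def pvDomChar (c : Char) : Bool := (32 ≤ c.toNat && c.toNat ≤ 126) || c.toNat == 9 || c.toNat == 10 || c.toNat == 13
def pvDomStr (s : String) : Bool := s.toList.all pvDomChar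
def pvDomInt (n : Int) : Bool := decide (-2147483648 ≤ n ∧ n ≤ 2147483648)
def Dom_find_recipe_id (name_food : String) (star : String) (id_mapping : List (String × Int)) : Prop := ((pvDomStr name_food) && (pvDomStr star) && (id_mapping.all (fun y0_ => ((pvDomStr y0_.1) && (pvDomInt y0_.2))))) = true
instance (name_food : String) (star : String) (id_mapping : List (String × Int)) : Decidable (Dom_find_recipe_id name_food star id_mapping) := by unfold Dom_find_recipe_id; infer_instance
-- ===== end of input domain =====

-- B replaces A's two staged scans by filter-then-select: one filtered match list, then a find within it (simpler decomposition).

-- ===== PORT A =====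
-- first loop: full name+star match (or no star)
def pvALoop1 (clean star : String) : List (String × Int) → Option Int
  | [] => none
  | (name, rid) :: rest =>
    if PySem.Str.isIn clean name then
      if star ≠ "" && PySem.Str.isIn star name then some rid
      else if star = "" then some rid
      else pvALoop1 clean star rest
    else pvALoop1 clean star rest

-- second loop: substring-only match
def pvALoop2 (clean : String) : List (String × Int) → Option Int
  | [] => none
  | (name, rid) :: rest =>
    if PySem.Str.isIn clean name then some rid else pvALoop2 clean rest

def find_recipe_id (name_food : String) (star : String) (id_mapping : List (String × Int)) : Option Int :=
  if name_food = "" then none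
  else
    let clean := PySem.Str.strip (((((PySem.Str.split? name_food "|").getD [])).headD ""))
    match pvALoop1 clean star id_mapping with
    | some r => some r
    | none => pvALoop2 clean id_mapping

-- ===== PORT B =====
def find_recipe_id_alt (name_food : String) (star : String) (id_mapping : List (String × Int)) : Option Int :=
  if name_food = "" then none
  else
    let clean := PySem.Str.strip (((((PySem.Str.split? name_food "|").getD [])).headD ""))
    let ms := id_mapping.filter (fun p => PySem.Str.isIn clean p.1)
    match ms with
    | [] => none
    | (_, r0) :: _ =>
      if star ≠ "" then
        match (ms.find? (fun p => PySem.Str.isIn star p.1)).map Prod.snd with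
        | some r => some r
        | none => some r0
      else some r0

-- ===== PRECONDITION & SPEC =====
def Spec_find_recipe_id (name_food : String) (star : String) (id_mapping : List (String × Int)) (out : Option Int) : Prop := out = find_recipe_id_alt name_food star id_mapping
instance (name_food : String) (star : String) (id_mapping : List (String × Int)) (out : Option Int) : Decidable (Spec_find_recipe_id name_food star id_mapping out) := by unfold Spec_find_recipe_id; infer_instance

-- ===== CLAIM =====
def Claim_equal_find_recipe_id : Prop := ∀ (name_food : String) (star : String) (id_mapping : List (String × Int)), Dom_find_recipe_id name_food star id_mapping → Spec_find_recipe_id name_food star id_mapping (find_recipe_id name_food star id_mapping)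

-- ===== LEMMAS AND PROOFS =====

-- A's second loop is the head of the filtered match list.
theorem pvALoop2_eq (clean : String) (l : List (String × Int)) :
    pvALoop2 clean l = ((l.filter (fun p => PySem.Str.isIn clean p.1)).head?).map Prod.snd := by
  induction l with
  | nil => simp [pvALoop2]
  | cons p rest ih =>
    obtain ⟨name, rid⟩ := p
    by_cases h : PySem.Chars.isIn clean.toList name.toList
    · simp [pvALoop2, PySem.Str.isIn, List.filter_cons, h]
    · simp [pvALoop2, PySem.Str.isIn, List.filter_cons, h, ih]

-- With empty star, A's first loop is also the head of the match list.
theorem pvALoop1_empty (clean : String) (l : List (String × Int)) :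
    pvALoop1 clean "" l = ((l.filter (fun p => PySem.Str.isIn clean p.1)).head?).map Prod.snd := by
  induction l with
  | nil => simp [pvALoop1]
  | cons p rest ih =>
    obtain ⟨name, rid⟩ := p
    by_cases h : PySem.Chars.isIn clean.toList name.toList
    · simp [pvALoop1, PySem.Str.isIn, List.filter_cons, h]
    · simp [pvALoop1, PySem.Str.isIn, List.filter_cons, h, ih]

-- With nonempty star, A's first loop is the first star match within the filtered list.
theorem pvALoop1_star (clean star : String) (hs : star ≠ "") (l : List (String × Int)) :
    pvALoop1 clean star l
      = ((l.filter (fun p => PySem.Str.isIn clean p.1)).find? (fun p => PySem.Str.isIn star p.1)).map Prod.snd := by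
  induction l with
  | nil => simp [pvALoop1]
  | cons p rest ih =>
    obtain ⟨name, rid⟩ := p
    by_cases h : PySem.Chars.isIn clean.toList name.toList
    · by_cases h2 : PySem.Chars.isIn star.toList name.toList
      · simp [pvALoop1, PySem.Str.isIn, List.filter_cons, List.find?_cons, h, h2, hs]
      · simp [pvALoop1, PySem.Str.isIn, List.filter_cons, List.find?_cons, h, h2, hs, ih]
    · simp [pvALoop1, PySem.Str.isIn, List.filter_cons, h, ih]

-- ===== VERDICT =====
theorem find_recipe_id_spec : Claim_equal_find_recipe_id := by
  intro name_food star id_mapping _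
  unfold Spec_find_recipe_id find_recipe_id find_recipe_id_alt
  by_cases h : name_food = ""
  · simp [h]
  · simp only [h, if_false]
    set clean := PySem.Str.strip (((((PySem.Str.split? name_food "|").getD [])).headD "")) with hc
    by_cases hs : star = ""
    · subst hs
      rw [pvALoop1_empty, pvALoop2_eq]
      cases hm : id_mapping.filter (fun p => PySem.Str.isIn clean p.1) with
      | nil => simp
      | cons q qs => obtain ⟨n0, r0⟩ := q; simp
    · rw [pvALoop1_star clean star hs, pvALoop2_eq]
      cases hm : id_mapping.filter (fun p => PySem.Str.isIn clean p.1) with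
      | nil => simp
      | cons q qs =>
        obtain ⟨n0, r0⟩ := q
        cases hf : (((n0, r0) :: qs : List (String × Int)).find? (fun p => PySem.Str.isIn star p.1)) with
        | none => simp [hf, hs]
        | some r => simp [hf, hs]
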